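-- pv_equiv track=rewrite | github.com/QleverAI/Qilin | services/ingestor_adsb/main.py | infer_country
-- ===== SOURCE A (Python) =====
-- _REG_PREFIX: list[tuple[str, str]] = sorted([
--     ("N",   "United States"),    ("G",   "United Kingdom"),
--     ("D",   "Germany"),          ("F",   "France"),
--     ("I",   "Italy"),            ("B",   "China"),
--     ("JA",  "Japan"),            ("HL",  "South Korea"),
--     ("VH",  "Australia"),        ("ZK",  "New Zealand"),
--     ("TC",  "Turkey"),           ("RA",  "Russia"),    ("RF", "Russia"),
--     ("4X",  "Israel"),           ("SX",  "Greece"),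
--     ("EC",  "Spain"),            ("CS",  "Portugal"),
--     ("OE",  "Austria"),          ("HB",  "Switzerland"),
--     ("PH",  "Netherlands"),      ("LN",  "Norway"),
--     ("SE",  "Sweden"),           ("OH",  "Finland"),
--     ("OY",  "Denmark"),          ("SP",  "Poland"),
--     ("OK",  "Czech Republic"),   ("HA",  "Hungary"),
--     ("YR",  "Romania"),          ("LZ",  "Bulgaria"),
--     ("LY",  "Lithuania"),        ("ES",  "Estonia"),
--     ("YL",  "Latvia"),           ("EI",  "Ireland"),
--     ("UR",  "Ukraine"),          ("EX",  "Kyrgyzstan"),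
--     ("UP",  "Kazakhstan"),       ("UN",  "Kazakhstan"),
--     ("4K",  "Azerbaijan"),       ("UK",  "Uzbekistan"),
--     ("EK",  "Armenia"),          ("A6",  "United Arab Emirates"),
--     ("A9C", "Bahrain"),          ("7T",  "Algeria"),
--     ("CN",  "Morocco"),          ("5A",  "Libya"),
--     ("SU",  "Egypt"),            ("OD",  "Lebanon"),
--     ("YK",  "Syria"),            ("JY",  "Jordan"),
--     ("HZ",  "Saudi Arabia"),     ("A4O", "Oman"),
--     ("A7",  "Qatar"),            ("9K",  "Kuwait"),
--     ("EP",  "Iran"),             ("YI",  "Iraq"),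
--     ("4W",  "Yemen"),            ("VT",  "India"),
--     ("PK",  "Indonesia"),        ("HS",  "Thailand"),
--     ("XV",  "Vietnam"),          ("9M",  "Malaysia"),
--     ("9V",  "Singapore"),        ("RP",  "Philippines"),
--     ("AP",  "Pakistan"),         ("S2",  "Bangladesh"),
--     ("YA",  "Afghanistan"),      ("ZS",  "South Africa"),
--     ("5N",  "Nigeria"),          ("ET",  "Ethiopia"),
--     ("CC",  "Chile"),            ("LV",  "Argentina"),
--     ("PP",  "Brazil"),           ("PT",  "Brazil"),
--     ("XA",  "Mexico"),           ("C",   "Canada"),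
-- ], key=lambda x: -len(x[0]))
--
-- def infer_country(registration: str | None) -> str | None:
--     if not registration:
--         return None
--     reg = registration.upper().strip()
--     for prefix, country in _REG_PREFIX:
--         if reg.startswith(prefix):
--             return country
--     return None
-- ===== SOURCE B (Python) =====
-- _TABLE = "N=United States,G=United Kingdom,D=Germany,F=France,I=Italy,B=China,JA=Japan,HL=South Korea,VH=Australia,ZK=New Zealand,TC=Turkey,RA=Russia,RF=Russia,4X=Israel,SX=Greece,EC=Spain,CS=Portugal,OE=Austria,HB=Switzerland,PH=Netherlands,LN=Norway,SE=Sweden,OH=Finland,OY=Denmark,SP=Poland,OK=Czech Republic,HA=Hungary,YR=Romania,LZ=Bulgaria,LY=Lithuania,ES=Estonia,YL=Latvia,EI=Ireland,UR=Ukraine,EX=Kyrgyzstan,UP=Kazakhstan,UN=Kazakhstan,4K=Azerbaijan,UK=Uzbekistan,EK=Armenia,A6=United Arab Emirates,A9C=Bahrain,7T=Algeria,CN=Morocco,5A=Libya,SU=Egypt,OD=Lebanon,YK=Syria,JY=Jordan,HZ=Saudi Arabia,A4O=Oman,A7=Qatar,9K=Kuwait,EP=Iran,YI=Iraq,4W=Yemen,VT=India,PK=Indonesia,HS=Thailand,XV=Vietnam,9M=Malaysia,9V=Singapore,RP=Philippines,AP=Pakistan,S2=Bangladesh,YA=Afghanistan,ZS=South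 Africa,5N=Nigeria,ET=Ethiopia,CC=Chile,LV=Argentina,PP=Brazil,PT=Brazil,XA=Mexico,C=Canada"
--
-- _PREFIX_MAP = {}
-- for _entry in _TABLE.split(","):
--     _p, _c = _entry.split("=")
--     _PREFIX_MAP[_p] = _c
--
--
-- def _lookup(prefix_map, reg, length):
--     if length == 0:
--         return None
--     country = prefix_map.get(reg[:length])
--     return country if country is not None else _lookup(prefix_map, reg, length - 1)
--
--
-- def infer_country(registration):
--     if not registration:
--         return None
--     return _lookup(_PREFIX_MAP, registration.upper().strip(), 3)
-- ===== Notes on version B (the rewrite author's own statement) =====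
-- stated objective: idiomatic
-- what changed: Replaces the linear startswith-scan over a length-sorted 75-entry prefix list with a prefix-to-country dict parsed once from a compact comma-separated table string and a recursive longest-prefix probe at lengths 3, 2, 1 (three hash lookups per call).
import Mathlib
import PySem

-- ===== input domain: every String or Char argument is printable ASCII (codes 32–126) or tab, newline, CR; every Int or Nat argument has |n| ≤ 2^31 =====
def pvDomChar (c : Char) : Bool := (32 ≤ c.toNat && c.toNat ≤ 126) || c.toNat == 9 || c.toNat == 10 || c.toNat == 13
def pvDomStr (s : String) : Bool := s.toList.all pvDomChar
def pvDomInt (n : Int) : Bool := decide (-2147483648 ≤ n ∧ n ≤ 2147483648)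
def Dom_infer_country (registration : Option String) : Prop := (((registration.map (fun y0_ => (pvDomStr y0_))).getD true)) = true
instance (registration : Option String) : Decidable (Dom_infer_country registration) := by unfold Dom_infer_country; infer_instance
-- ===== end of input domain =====

-- B replaces A's linear startswith-scan of a length-sorted 75-tuple table by a prefix→country
-- dict (parsed once from a compact "P=Country,…" string), probed recursively at prefix lengths
-- 3,2,1 (idiomatic longest-prefix lookup; same return value everywhere).

-- ===== PORT A =====
def pvRegPrefixRaw : List (String × String) := [("N", "United States"), ("G", "United Kingdom"), ("D", "Germany"), ("F", "France"), ("I", "Italy"), ("B", "China"), ("JA", "Japan"), ("HL", "South Korea"), ("VH", "Australia"), ("ZK", "New Zealand"), ("TC", "Turkey"), ("RA", "Russia"), ("RF", "Russia"), ("4X", "Israel"), ("SX", "Greece"), ("EC", "Spain"), ("CS", "Portugal"), ("OE", "Austria"), ("HB", "Switzerland"), ("PH", "Netherlands"), ("LN", "Norway"), ("SE", "Sweden"), ("OH", "Finland"), ("OY", "Denmark"), ("SP", "Poland"), ("OK", "Czech Republic"), ("HA", "Hungary"), ("YR", "Romania"), ("LZ", "Bulgaria"), ("LY", "Lithuania"),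 ("ES", "Estonia"), ("YL", "Latvia"), ("EI", "Ireland"), ("UR", "Ukraine"), ("EX", "Kyrgyzstan"), ("UP", "Kazakhstan"), ("UN", "Kazakhstan"), ("4K", "Azerbaijan"), ("UK", "Uzbekistan"), ("EK", "Armenia"), ("A6", "United Arab Emirates"), ("A9C", "Bahrain"), ("7T", "Algeria"), ("CN", "Morocco"), ("5A", "Libya"), ("SU", "Egypt"), ("OD", "Lebanon"), ("YK", "Syria"), ("JY", "Jordan"), ("HZ", "Saudi Arabia"), ("A4O", "Oman"), ("A7", "Qatar"), ("9K", "Kuwait"), ("EP", "Iran"), ("YI", "Iraq"), ("4W", "Yemen"), ("VT", "India"), ("PK", "Indonesia"), ("HS", "Thailand"), ("XV", "Vietnam"), ("9M", "Malaysia"), ("9V", "Singapore"), ("RP", "Philippines"), ("AP", "Pakistan"), ("S2", "Bangladesh"), ("YA", "Afghanistan"), ("ZS", "South Africa"), ("5N", "Nigeria"), ("ET", "Ethiopia"), ("CC", "Chile"), ("LV", "Argentina"), ("PP", "Brazil"), ("PT", "Brazil"), ("XA", "Mexico"), ("C", "Canada")]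

def pvRegPrefix : List (String × String) :=
  PySem.List.sorted pvRegPrefixRaw (fun x => -(PySem.Str.len x.1)) false

def pvScanA : List (String × String) → String → Option String
  | [], _ => none
  | (p, c) :: rest, reg =>
    if PySem.Str.startswith reg p then some c else pvScanA rest reg

def infer_country (registration : Option String) : Option String :=
  match registration with
  | none => none
  | some s =>
    if s = "" then none
    else pvScanA pvRegPrefix (PySem.Str.strip (PySem.Str.upper s))

-- ===== PORT B =====
def pvTableStr : String := "N=United States,G=United Kingdom,D=Germany,F=France,I=Italy,B=China,JA=Japan,HL=South Korea,VH=Australia,ZK=New Zealand,TC=Turkey,RA=Russia,RF=Russia,4X=Israel,SX=Greece,EC=Spain,CS=Portugal,OE=Austria,HB=Switzerland,PH=Netherlands,LN=Norway,SE=Sweden,OH=Finland,OY=Denmark,SP=Poland,OK=Czech Republic,HA=Hungary,YR=Romania,LZ=Bulgaria,LY=Lithuania,ES=Estonia,YL=Latvia,EI=Ireland,UR=Ukraine,EX=Kyrgyzstan,UP=Kazakhstan,UN=Kazakhstan,4K=Azerbaijan,UK=Uzbekistan,EK=Armenia,A6=United Arab Emirates,A9C=Bahrain,7T=Algeria,CN=Morocco,5A=Libya,SU=Egypt,OD=Lebanon,YK=Syria,JY=Jordan,HZ=Saudi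 Arabia,A4O=Oman,A7=Qatar,9K=Kuwait,EP=Iran,YI=Iraq,4W=Yemen,VT=India,PK=Indonesia,HS=Thailand,XV=Vietnam,9M=Malaysia,9V=Singapore,RP=Philippines,AP=Pakistan,S2=Bangladesh,YA=Afghanistan,ZS=South Africa,5N=Nigeria,ET=Ethiopia,CC=Chile,LV=Argentina,PP=Brazil,PT=Brazil,XA=Mexico,C=Canada"

-- split? returns some for the nonempty separators used here; _p, _c = _entry.split("=") is exact:
-- every entry of the literal table contains exactly one '='
def pvPairsB : List (String × String) :=
  ((PySem.Str.split? pvTableStr ",").getD []).map (fun e =>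
    let parts := (PySem.Str.split? e "=").getD []
    (parts.headD "", (parts.drop 1).headD ""))

def pvPrefixMapB : PySem.Dict String String :=
  pvPairsB.foldl (fun d pc => d.insert pc.1 pc.2) PySem.Dict.empty

-- recursion on the Nat length (Python recurses on an int that starts at 3 and stops at 0: exact)
def pvLookupB (d : PySem.Dict String String) (reg : String) : Nat → Option String
  | 0 => none
  | (L + 1) =>
    match d.get? (PySem.Str.slice reg none (some ((L : Int) + 1))) with
    | some c => some c
    | none => pvLookupB d reg L

def infer_country_alt (registration : Option String) : Option String :=
  match registration with
  | none => none
  | some s =>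
    if s = "" then none
    else pvLookupB pvPrefixMapB (PySem.Str.strip (PySem.Str.upper s)) 3

-- ===== PRECONDITION & SPEC =====
def Spec_infer_country (registration : Option String) (out : Option String) : Prop := out = infer_country_alt registration
instance (registration : Option String) (out : Option String) : Decidable (Spec_infer_country registration out) := by unfold Spec_infer_country; infer_instance

-- ===== CLAIM (what is proved, stated in full; the proofs are below) =====
def Claim_equal_infer_country : Prop := ∀ (registration : Option String), Dom_infer_country registration → Spec_infer_country registration (infer_country registration)

-- ===== LEMMAS AND PROOFS =====

-- the three length classes of the table, in A's (stable-sorted) order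
def pvS3 : List (String × String) := [("A9C", "Bahrain"), ("A4O", "Oman")]
def pvS2 : List (String × String) := [("JA", "Japan"), ("HL", "South Korea"), ("VH", "Australia"), ("ZK", "New Zealand"), ("TC", "Turkey"), ("RA", "Russia"), ("RF", "Russia"), ("4X", "Israel"), ("SX", "Greece"), ("EC", "Spain"), ("CS", "Portugal"), ("OE", "Austria"), ("HB", "Switzerland"), ("PH", "Netherlands"), ("LN", "Norway"), ("SE", "Sweden"), ("OH", "Finland"), ("OY", "Denmark"), ("SP", "Poland"), ("OK", "Czech Republic"), ("HA", "Hungary"), ("YR", "Romania"), ("LZ", "Bulgaria"), ("LY", "Lithuania"), ("ES", "Estonia"), ("YL", "Latvia"), ("EI", "Ireland"), ("UR", "Ukraine"), ("EX", "Kyrgyzstan"), ("UP", "Kazakhstan"), ("UN", "Kazakhstan"), ("4K", "Azerbaijan"), ("UK", "Uzbekistan"), ("EK", "Armenia"), ("A6", "United Arab Emirates"), ("7T", "Algeria"), ("CN", "Morocco"), ("5A", "Libya"), ("SU", "Egypt"), ("OD", "Lebanon"), ("YK", "Syria"), ("JY", "Jordan"), ("HZ", "Saudi Arabia"), ("A7",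 "Qatar"), ("9K", "Kuwait"), ("EP", "Iran"), ("YI", "Iraq"), ("4W", "Yemen"), ("VT", "India"), ("PK", "Indonesia"), ("HS", "Thailand"), ("XV", "Vietnam"), ("9M", "Malaysia"), ("9V", "Singapore"), ("RP", "Philippines"), ("AP", "Pakistan"), ("S2", "Bangladesh"), ("YA", "Afghanistan"), ("ZS", "South Africa"), ("5N", "Nigeria"), ("ET", "Ethiopia"), ("CC", "Chile"), ("LV", "Argentina"), ("PP", "Brazil"), ("PT", "Brazil"), ("XA", "Mexico")]
def pvS1 : List (String × String) := [("N", "United States"), ("G", "United Kingdom"), ("D", "Germany"), ("F", "France"), ("I", "Italy"), ("B", "China"), ("C", "Canada")]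

-- plain first-match association lookup, the common denominator of both ports
def pvLk : List (String × String) → String → Option String
  | [], _ => none
  | (p, c) :: rest, k => if k = p then some c else pvLk rest k

set_option maxRecDepth 100000 in
theorem pvSorted_eq : pvRegPrefix = pvS3 ++ pvS2 ++ pvS1 := by decide

set_option maxRecDepth 2000000 in
set_option maxHeartbeats 8000000 in
theorem pvPairsB_eq : pvPairsB = pvRegPrefixRaw := by decide

theorem pvNodupB : (pvRegPrefixRaw.map Prod.fst).Nodup := by decide

theorem pvFoldl_insert_mk (l : List (String × String)) (d : PySem.Dict String String)
    (h : ∀ p ∈ l, d.contains p.1 = false) (hnd : (l.map Prod.fst).Nodup) :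
    l.foldl (fun d pc => d.insert pc.1 pc.2) d = PySem.Dict.mk (d.items ++ l) := by
  induction l generalizing d with
  | nil => exact PySem.Dict.ext (by simp)
  | cons p rest ih =>
    obtain ⟨k, v⟩ := p
    simp only [List.map_cons, List.nodup_cons] at hnd
    have hk : d.contains k = false := h (k, v) (by simp)
    have hrest : ∀ q ∈ rest, (d.insert k v).contains q.1 = false := by
      intro q hq
      rw [PySem.Dict.contains_insert]
      have h1 : d.contains q.1 = false := h q (by simp [hq])
      have h2 : ¬ (q.1 = k) := fun he => hnd.1 (he ▸ List.mem_map_of_mem (f := Prod.fst) hq)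
      simp [h1, h2]
    rw [List.foldl_cons, ih (d.insert k v) hrest hnd.2]
    apply PySem.Dict.ext
    have hi : (d.insert k v).items = d.items ++ [(k, v)] :=
      PySem.Dict.items_insert_of_not_contains d v hk
    simp [hi]

theorem pvMapB_eq_mk : pvPrefixMapB = PySem.Dict.mk pvRegPrefixRaw := by
  have he : ∀ p ∈ pvRegPrefixRaw, (PySem.Dict.empty : PySem.Dict String String).contains p.1 = false := by
    intro p _; rfl
  rw [pvPrefixMapB, pvPairsB_eq, pvFoldl_insert_mk pvRegPrefixRaw PySem.Dict.empty he pvNodupB]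
  rfl

set_option maxRecDepth 100000 in
theorem pvPerm : pvRegPrefixRaw.Perm (pvS3 ++ pvS2 ++ pvS1) := by decide

theorem pvLenS3 : ∀ p ∈ pvS3, p.1.toList.length = 3 := by decide
theorem pvLenS2 : ∀ p ∈ pvS2, p.1.toList.length = 2 := by decide
theorem pvLenS1 : ∀ p ∈ pvS1, p.1.toList.length = 1 := by decide

theorem pvGet?_eq_lk : ∀ (l : List (String × String)) (k : String),
    (PySem.Dict.mk l).get? k = pvLk l k := by
  intro l
  induction l with
  | nil => intro k; rfl
  | cons p rest ih =>
    intro k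
    obtain ⟨q, c⟩ := p
    rw [PySem.Dict.get?_mk_cons, pvLk]
    by_cases h : k = q
    · simp [h]
    · simp [h, Ne.symm h, ih k]

theorem pvLk_append (l1 l2 : List (String × String)) (k : String) :
    pvLk (l1 ++ l2) k =
      match pvLk l1 k with
      | some c => some c
      | none => pvLk l2 k := by
  induction l1 with
  | nil => rfl
  | cons p rest ih =>
    obtain ⟨q, c⟩ := p
    by_cases h : k = q <;> simp [pvLk, h, ih]

theorem pvScanA_append (l1 l2 : List (String × String)) (reg : String) :
    pvScanA (l1 ++ l2) reg =
      match pvScanA l1 reg with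
      | some c => some c
      | none => pvScanA l2 reg := by
  induction l1 with
  | nil => rfl
  | cons p rest ih =>
    obtain ⟨q, c⟩ := p
    by_cases h : PySem.Chars.startswith reg.toList q.toList = true <;> simp [pvScanA, h, ih]

theorem pvScan_eq_lk (l : List (String × String)) (L : Nat)
    (h : ∀ p ∈ l, p.1.toList.length = L) (reg : String) :
    pvScanA l reg = pvLk l (String.ofList (reg.toList.take L)) := by
  induction l with
  | nil => rfl
  | cons p rest ih =>
    obtain ⟨q, c⟩ := p
    have hq : q.toList.length = L := h (q, c) (by simp)
    have hiff : (PySem.Str.startswith reg q = true) ↔ (String.ofList (reg.toList.take L) = q) := by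
      rw [show PySem.Str.startswith reg q = PySem.Chars.startswith reg.toList q.toList from by
            simp [PySem.Str.startswith_eq]]
      rw [PySem.Chars.startswith_iff, List.prefix_iff_eq_take, hq]
      constructor
      · intro he
        apply String.toList_inj.mp
        rw [String.toList_ofList, ← he]
      · intro he
        rw [← he, String.toList_ofList]
    have hiff' : (PySem.Chars.startswith reg.toList q.toList = true) ↔ (String.ofList (reg.toList.take L) = q) := by
      rw [← hiff]; simp [PySem.Str.startswith_eq]
    by_cases hb : PySem.Chars.startswith reg.toList q.toList = true
    · simp [pvScanA, pvLk, hb, hiff'.mp hb]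
    · have hb' : ¬ (String.ofList (reg.toList.take L) = q) := fun hh => hb (hiff'.mpr hh)
      simp [pvScanA, pvLk, hb, hb', ih (fun p hp => h p (by simp [hp]))]

theorem pvLk_none_of_len (l : List (String × String)) (L : Nat)
    (h : ∀ p ∈ l, p.1.toList.length = L) (k : String) (hk : k.toList.length ≠ L) :
    pvLk l k = none := by
  induction l with
  | nil => rfl
  | cons p rest ih =>
    obtain ⟨q, c⟩ := p
    have hq : q.toList.length = L := h (q, c) (by simp)
    have hne : k ≠ q := by
      intro he; apply hk; rw [he, hq]
    simp [pvLk, hne, ih (fun p hp => h p (by simp [hp]))]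

theorem pvLk_some_iff (l : List (String × String)) (hnd : (l.map Prod.fst).Nodup)
    (k : String) (c : String) : pvLk l k = some c ↔ (k, c) ∈ l := by
  induction l with
  | nil => simp [pvLk]
  | cons p rest ih =>
    obtain ⟨q, v⟩ := p
    simp only [List.map_cons, List.nodup_cons] at hnd
    by_cases h : k = q
    · subst h
      have hv : pvLk ((k, v) :: rest) k = some v := by simp [pvLk]
      rw [hv]
      constructor
      · intro he; injection he with he; subst he; exact List.mem_cons_self
      · intro he
        rcases List.mem_cons.mp he with he | he
        · injection he with h1 h2; rw [h2]
        · exact absurd (List.mem_map_of_mem (f := Prod.fst) he) hnd.1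
    · simp [pvLk, h, ih hnd.2]

theorem pvLk_none_iff (l : List (String × String)) (k : String) :
    pvLk l k = none ↔ k ∉ l.map Prod.fst := by
  induction l with
  | nil => simp [pvLk]
  | cons p rest ih =>
    obtain ⟨q, v⟩ := p
    by_cases h : k = q <;> simp [pvLk, h, ih]

theorem pvLk_perm (l l' : List (String × String)) (h : l.Perm l')
    (hnd : (l.map Prod.fst).Nodup) (k : String) : pvLk l k = pvLk l' k := by
  have hnd' : (l'.map Prod.fst).Nodup := ((h.map Prod.fst).nodup_iff).mp hnd
  cases e : pvLk l k with
  | some c =>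
    have hm : (k, c) ∈ l := (pvLk_some_iff l hnd k c).mp e
    exact ((pvLk_some_iff l' hnd' k c).mpr (h.mem_iff.mp hm)).symm
  | none =>
    have hm : k ∉ l.map Prod.fst := (pvLk_none_iff l k).mp e
    exact ((pvLk_none_iff l' k).mpr (fun hc => hm ((h.map Prod.fst).mem_iff.mpr hc))).symm

theorem pvSlice_take (reg : String) (b : Int) (hb : 0 ≤ b) :
    PySem.Str.slice reg none (some b) = String.ofList (reg.toList.take b.toNat) := by
  apply String.toList_inj.mp
  rw [String.toList_ofList, PySem.Str.toList_slice, PySem.Chars.slice_eq_listSlice,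
    PySem.List.slice_to reg.toList hb]

theorem pvLookupB_succ (d : PySem.Dict String String) (reg : String) (L : Nat) :
    pvLookupB d reg (L + 1) =
      match d.get? (PySem.Str.slice reg none (some ((L : Int) + 1))) with
      | some c => some c
      | none => pvLookupB d reg L := by rw [pvLookupB]

theorem pvLookupB_eq_lk (reg : String) :
    pvLookupB pvPrefixMapB reg 3 =
      match pvLk (pvS3 ++ pvS2 ++ pvS1) (String.ofList (reg.toList.take 3)) with
      | some c => some c
      | none =>
        match pvLk (pvS3 ++ pvS2 ++ pvS1) (String.ofList (reg.toList.take 2)) with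
        | some c => some c
        | none => pvLk (pvS3 ++ pvS2 ++ pvS1) (String.ofList (reg.toList.take 1)) := by
  rw [show (3 : Nat) = 2 + 1 from rfl, pvLookupB_succ,
    show (2 : Nat) = 1 + 1 from rfl, pvLookupB_succ,
    show (1 : Nat) = 0 + 1 from rfl, pvLookupB_succ,
    show ∀ r, pvLookupB pvPrefixMapB r 0 = none from fun _ => rfl, pvMapB_eq_mk]
  norm_num
  simp only [pvGet?_eq_lk, pvLk_perm pvRegPrefixRaw (pvS3 ++ pvS2 ++ pvS1) pvPerm pvNodupB,
    pvSlice_take reg 3 (by norm_num), pvSlice_take reg 2 (by norm_num),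
    pvSlice_take reg 1 (by norm_num), show Int.toNat 3 = 3 from rfl,
    show Int.toNat 2 = 2 from rfl, show Int.toNat 1 = 1 from rfl,
    List.append_assoc]
  cases pvLk (pvS3 ++ (pvS2 ++ pvS1)) (String.ofList (reg.toList.take 3)) <;>
    cases pvLk (pvS3 ++ (pvS2 ++ pvS1)) (String.ofList (reg.toList.take 2)) <;>
      cases pvLk (pvS3 ++ (pvS2 ++ pvS1)) (String.ofList (reg.toList.take 1)) <;> rfl

theorem pvLen_take (reg : String) (L : Nat) :
    (String.ofList (reg.toList.take L)).toList.length = min L reg.toList.length := by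
  rw [String.toList_ofList, List.length_take]

theorem pvMain (reg : String) : pvScanA pvRegPrefix reg = pvLookupB pvPrefixMapB reg 3 := by
  rw [pvLookupB_eq_lk, pvSorted_eq]
  simp only [pvScanA_append]
  rw [pvScan_eq_lk pvS3 3 pvLenS3 reg, pvScan_eq_lk pvS2 2 pvLenS2 reg,
    pvScan_eq_lk pvS1 1 pvLenS1 reg]
  have hnone : ∀ (seg : List (String × String)) (L : Nat),
      (∀ p ∈ seg, p.1.toList.length = L) → ∀ (M : Nat),
      min M reg.toList.length ≠ L →
      pvLk seg (String.ofList (reg.toList.take M)) = none := by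
    intro seg L hseg M hM
    exact pvLk_none_of_len seg L hseg _ (by rw [pvLen_take]; exact hM)
  by_cases h3 : 3 ≤ reg.toList.length
  · have e23 := hnone pvS2 2 pvLenS2 3 (by omega)
    have e13 := hnone pvS1 1 pvLenS1 3 (by omega)
    have e32 := hnone pvS3 3 pvLenS3 2 (by omega)
    have e12 := hnone pvS1 1 pvLenS1 2 (by omega)
    have e31 := hnone pvS3 3 pvLenS3 1 (by omega)
    have e21 := hnone pvS2 2 pvLenS2 1 (by omega)
    simp only [pvLk_append, e23, e13, e32, e12, e31, e21]
    cases pvLk pvS3 (String.ofList (reg.toList.take 3)) <;>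
      cases pvLk pvS2 (String.ofList (reg.toList.take 2)) <;>
        cases pvLk pvS1 (String.ofList (reg.toList.take 1)) <;> rfl
  · by_cases h2 : 2 ≤ reg.toList.length
    · have ht : reg.toList.take 3 = reg.toList.take 2 := by
        rw [List.take_of_length_le (by omega), List.take_of_length_le (by omega)]
      rw [ht]
      have e32 := hnone pvS3 3 pvLenS3 2 (by omega)
      have e12 := hnone pvS1 1 pvLenS1 2 (by omega)
      have e31 := hnone pvS3 3 pvLenS3 1 (by omega)
      have e21 := hnone pvS2 2 pvLenS2 1 (by omega)
      simp only [pvLk_append, e32, e12, e31, e21]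
      cases pvLk pvS2 (String.ofList (reg.toList.take 2)) <;>
        cases pvLk pvS1 (String.ofList (reg.toList.take 1)) <;> rfl
    · by_cases h1 : 1 ≤ reg.toList.length
      · have ht3 : reg.toList.take 3 = reg.toList.take 1 := by
          rw [List.take_of_length_le (by omega), List.take_of_length_le (by omega)]
        have ht2 : reg.toList.take 2 = reg.toList.take 1 := by
          rw [List.take_of_length_le (by omega), List.take_of_length_le (by omega)]
        rw [ht3, ht2]
        have e31 := hnone pvS3 3 pvLenS3 1 (by omega)
        have e21 := hnone pvS2 2 pvLenS2 1 (by omega)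
        simp only [pvLk_append, e31, e21]
        cases pvLk pvS1 (String.ofList (reg.toList.take 1)) <;> rfl
      · have e3 := hnone pvS3 3 pvLenS3 3 (by omega)
        have e2 := hnone pvS2 2 pvLenS2 2 (by omega)
        have e1 := hnone pvS1 1 pvLenS1 1 (by omega)
        have e23 := hnone pvS2 2 pvLenS2 3 (by omega)
        have e13 := hnone pvS1 1 pvLenS1 3 (by omega)
        have e32 := hnone pvS3 3 pvLenS3 2 (by omega)
        have e12 := hnone pvS1 1 pvLenS1 2 (by omega)
        have e31 := hnone pvS3 3 pvLenS3 1 (by omega)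
        have e21 := hnone pvS2 2 pvLenS2 1 (by omega)
        simp only [pvLk_append, e3, e2, e1, e23, e13, e32, e12, e31, e21]

-- ===== VERDICT (by name: the statement is the Claim_ definition above) =====
theorem infer_country_spec : Claim_equal_infer_country := by
  intro registration _
  unfold Spec_infer_country
  cases registration with
  | none => rfl
  | some s =>
    by_cases h : s = ""
    · simp [infer_country, infer_country_alt, h]
    · simp [infer_country, infer_country_alt, h, pvMain]
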